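-- pv_equiv track=rewrite | github.com/museu-do-novo/repertorio | transposer.py | acorde_para_sustenido
-- ===== SOURCE A (Python) =====
-- ENHARMONIC_SHARP = {
--     "Db": "C#",
--     "Eb": "D#",
--     "Gb": "F#",
--     "Ab": "G#",
--     "Bb": "A#",
-- }
--
-- def acorde_para_sustenido(acorde: str) -> str:
--     """Força grafia sustenido nos acordes já transpostos."""
--     for bemol, sust in ENHARMONIC_SHARP.items():
--         if acorde.startswith(bemol):
--             acorde = acorde.replace(bemol, sust, 1)
--
--     # baixo do acorde
--     if "/" in acorde:
--         base, baixo = acorde.split("/", 1)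
--         for bemol, sust in ENHARMONIC_SHARP.items():
--             if baixo.startswith(bemol):
--                 baixo = baixo.replace(bemol, sust, 1)
--                 acorde = f"{base}/{baixo}"
--
--     return acorde
-- ===== SOURCE B (Python) =====
-- ENHARMONIC_SHARP = {
--     "Db": "C#",
--     "Eb": "D#",
--     "Gb": "F#",
--     "Ab": "G#",
--     "Bb": "A#",
-- }
--
--
-- def _sharp(part: str) -> str:
--     pre = part[:2]
--     if pre in ENHARMONIC_SHARP:
--         return ENHARMONIC_SHARP[pre] + part[2:]
--     return part
--
--
-- def acorde_para_sustenido(acorde: str) -> str: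
--     """Força grafia sustenido nos acordes já transpostos."""
--     return "/".join(_sharp(p) for p in acorde.split("/", 1))
-- ===== Notes on version B (the rewrite author's own statement) =====
-- stated objective: simpler
-- what changed: B splits once at the first slash (maxsplit 1) and maps a single pure prefix-lookup conversion (first two characters looked up in the dict) over both parts before rejoining, instead of A's two duplicated scan-the-dict-with-startswith-and-replace loops plus in-place string rebuilding.
import Mathlib
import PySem

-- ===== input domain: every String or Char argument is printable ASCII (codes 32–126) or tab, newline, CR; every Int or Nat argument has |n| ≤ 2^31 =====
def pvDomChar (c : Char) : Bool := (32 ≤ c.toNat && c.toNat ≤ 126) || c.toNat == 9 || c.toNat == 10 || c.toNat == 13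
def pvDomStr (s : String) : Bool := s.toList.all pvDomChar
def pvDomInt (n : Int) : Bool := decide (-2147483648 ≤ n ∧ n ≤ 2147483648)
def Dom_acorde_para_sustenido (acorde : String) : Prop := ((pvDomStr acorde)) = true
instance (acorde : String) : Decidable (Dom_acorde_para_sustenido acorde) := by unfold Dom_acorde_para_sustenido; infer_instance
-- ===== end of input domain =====

-- B replaces A's two duplicated startswith/replace dict scans by one split('/',1) plus a
-- single prefix-lookup conversion mapped over the parts (objective: simpler).

-- ===== PORT A =====
-- module constant ENHARMONIC_SHARP (keys/values kept as List Char; the ports work on .toList)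
def ENHARMONIC_SHARP : PySem.Dict (List Char) (List Char) :=
  PySem.Dict.ofList
    [ (['D','b'], ['C','#'])
    , (['E','b'], ['D','#'])
    , (['G','b'], ['F','#'])
    , (['A','b'], ['G','#'])
    , (['B','b'], ['A','#']) ]

-- hand port of Python's s.replace(old, new, 1): replace the LEFTMOST occurrence of old,
-- if any (exact for old ≠ "", the only way A calls it)
def pvReplace1 (s old new : List Char) : List Char :=
  match s with
  | [] => []
  | c :: rest =>
    if old.isPrefixOf (c :: rest) then new ++ (c :: rest).drop old.length
    else c :: pvReplace1 rest old new

def acorde_para_sustenido (acorde : String) : String :=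
  -- for bemol, sust in ENHARMONIC_SHARP.items(): if acorde.startswith(bemol): acorde = acorde.replace(bemol, sust, 1)
  let ac1 := ENHARMONIC_SHARP.items.foldl
    (fun ac p => if PySem.Chars.startswith ac p.1 then pvReplace1 ac p.1 p.2 else ac)
    acorde.toList
  -- if "/" in acorde: base, baixo = acorde.split("/", 1); same loop over baixo, acorde = f"{base}/{baixo}"
  let ac2 :=
    if PySem.Chars.isIn ['/'] ac1 then
      match PySem.Chars.splitOnMax ac1 ['/'] 1 with
      | [base, baixo] =>
        (ENHARMONIC_SHARP.items.foldl
          (fun st p =>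
            if PySem.Chars.startswith st.2 p.1 then
              let b := pvReplace1 st.2 p.1 p.2
              (base ++ '/' :: b, b)
            else st)
          (ac1, baixo)).1
      | _ => ac1  -- unreachable: split("/", 1) with "/" present yields exactly two parts
    else ac1
  String.mk ac2

-- ===== PORT B =====
def pvSharp (part : List Char) : List Char :=
  -- pre = part[:2]; return ENHARMONIC_SHARP[pre] + part[2:] if pre in ENHARMONIC_SHARP else part
  let pre := PySem.List.slice part none (some 2)
  if ENHARMONIC_SHARP.contains pre then
    ENHARMONIC_SHARP.getD pre [] ++ PySem.List.slice part (some 2) none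
  else part

def acorde_para_sustenido_alt (acorde : String) : String :=
  -- return "/".join(_sharp(p) for p in acorde.split("/", 1))
  String.mk (PySem.Chars.join ['/'] ((PySem.Chars.splitOnMax acorde.toList ['/'] 1).map pvSharp))

-- ===== PRECONDITION & SPEC =====
def Spec_acorde_para_sustenido (acorde : String) (out : String) : Prop := out = acorde_para_sustenido_alt acorde
instance (acorde : String) (out : String) : Decidable (Spec_acorde_para_sustenido acorde out) := by unfold Spec_acorde_para_sustenido; infer_instance

-- ===== CLAIM (what is proved, stated in full; the proofs are below) =====
def Claim_equal_acorde_para_sustenido : Prop := ∀ (acorde : String), Dom_acorde_para_sustenido acorde → Spec_acorde_para_sustenido acorde (acorde_para_sustenido acorde)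

-- ===== LEMMAS AND PROOFS =====

-- proof-side characterisation of split("/", 1): everything before / after the first '/'
def splitFirst : List Char → Option (List Char × List Char)
  | [] => none
  | c :: r => if c = '/' then some ([], r) else (splitFirst r).map (fun p => (c :: p.1, p.2))

theorem splitFirst_none_iff (cs : List Char) : splitFirst cs = none ↔ '/' ∉ cs := by
  induction cs with
  | nil => simp [splitFirst]
  | cons c r ih =>
    by_cases h : c = '/'
    · simp [splitFirst, h]
    · simp [splitFirst, h, Option.map_eq_none_iff, ih, Ne.symm h]

theorem splitFirst_some (cs a b : List Char) (h : splitFirst cs = some (a, b)) :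
    cs = a ++ '/' :: b ∧ '/' ∉ a := by
  induction cs generalizing a b with
  | nil => simp [splitFirst] at h
  | cons c r ih =>
    by_cases hc : c = '/'
    · simp [splitFirst, hc] at h
      obtain ⟨h1, h2⟩ := h
      subst h1; subst h2
      simp [hc]
    · cases hs : splitFirst r with
      | none => simp [splitFirst, hc, hs] at h
      | some p =>
        obtain ⟨a', b'⟩ := p
        simp [splitFirst, hc, hs] at h
        obtain ⟨e1, e2⟩ := ih a' b' hs
        obtain ⟨h1, h2⟩ := h
        subst h2
        simp [← h1, e1, e2, Ne.symm hc]

theorem splitFirst_append (a b : List Char) (h : '/' ∉ a) :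
    splitFirst (a ++ '/' :: b) = some (a, b) := by
  induction a with
  | nil => simp [splitFirst]
  | cons c r ih =>
    simp at h
    simp [splitFirst, Ne.symm (Ne.intro h.1), ih h.2]

theorem go_zero (f : Nat) (l cur : List Char) (acc : List (List Char)) :
    PySem.Chars.splitOnMax.go ['/'] f 0 l cur acc = ((cur.reverse ++ l) :: acc).reverse := by
  cases f with
  | zero => rw [PySem.Chars.splitOnMax.go.eq_def]
  | succ f =>
    cases l with
    | nil => rw [PySem.Chars.splitOnMax.go.eq_def]; simp
    | cons c rest => rw [PySem.Chars.splitOnMax.go.eq_def]; simp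

theorem go_one (fuel : Nat) (cs : List Char) (h : cs.length < fuel) (cur : List Char) (acc : List (List Char)) :
    PySem.Chars.splitOnMax.go ['/'] fuel 1 cs cur acc =
      match splitFirst cs with
      | none => ((cur.reverse ++ cs) :: acc).reverse
      | some (a, b) => acc.reverse ++ [cur.reverse ++ a, b] := by
  induction fuel generalizing cs cur acc with
  | zero => omega
  | succ f ih =>
    cases cs with
    | nil => rw [PySem.Chars.splitOnMax.go.eq_def]; simp [splitFirst]
    | cons c rest =>
      by_cases hc : c = '/'
      · rw [PySem.Chars.splitOnMax.go.eq_def]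
        simp [hc, List.isPrefixOf, go_zero, splitFirst]
      · rw [PySem.Chars.splitOnMax.go.eq_def]
        simp only [List.isPrefixOf]
        rw [ih rest (by simp at h; omega) (c :: cur) acc]
        cases hs : splitFirst rest with
        | none => simp [splitFirst, hc, hs, Ne.symm hc]
        | some p => obtain ⟨a, b⟩ := p; simp [splitFirst, hc, hs, Ne.symm hc]

theorem splitOnMax_one (cs : List Char) :
    PySem.Chars.splitOnMax cs ['/'] 1 =
      match splitFirst cs with
      | none => [cs]
      | some (a, b) => [a, b] := by
  unfold PySem.Chars.splitOnMax
  rw [if_neg (by omega)]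
  have h1 : (1 : Int).toNat = 1 := rfl
  rw [h1, go_one (cs.length + 1) cs (by omega)]
  cases hs : splitFirst cs with
  | none => simp
  | some p => simp

theorem items_lit : ENHARMONIC_SHARP.items =
    [ (['D','b'], ['C','#']), (['E','b'], ['D','#']), (['G','b'], ['F','#'])
    , (['A','b'], ['G','#']), (['B','b'], ['A','#']) ] := by decide

theorem contains_pair (pre : List Char) : ENHARMONIC_SHARP.contains pre =
    (['D','b'] == pre || ['E','b'] == pre || ['G','b'] == pre || ['A','b'] == pre || ['B','b'] == pre) := by
  simp [PySem.Dict.contains, items_lit, List.any, Bool.or_assoc]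

-- A's root loop (scan all dict entries with startswith + replace) = B's prefix lookup
theorem fold_eq_sharp (cs : List Char) :
    ENHARMONIC_SHARP.items.foldl
      (fun ac p => if PySem.Chars.startswith ac p.1 then pvReplace1 ac p.1 p.2 else ac) cs
      = pvSharp cs := by
  rw [items_lit]
  match cs with
  | [] => decide
  | [a] =>
    simp [List.foldl, PySem.Chars.startswith, List.isPrefixOf, pvSharp,
      PySem.List.slice, contains_pair]
  | a :: b :: rest =>
    by_cases hb : b = 'b'
    · subst hb
      by_cases h1 : a = 'D'
      · subst h1
        simp [List.foldl, PySem.Chars.startswith, List.isPrefixOf, pvReplace1, pvSharp,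
          PySem.List.slice, contains_pair, (by decide : ENHARMONIC_SHARP.getD ['D','b'] [] = ['C','#'])]
      · by_cases h2 : a = 'E'
        · subst h2
          simp [List.foldl, PySem.Chars.startswith, List.isPrefixOf, pvReplace1, pvSharp,
            PySem.List.slice, contains_pair, (by decide : ENHARMONIC_SHARP.getD ['E','b'] [] = ['D','#'])]
        · by_cases h3 : a = 'G'
          · subst h3
            simp [List.foldl, PySem.Chars.startswith, List.isPrefixOf, pvReplace1, pvSharp,
              PySem.List.slice, contains_pair, (by decide : ENHARMONIC_SHARP.getD ['G','b'] [] = ['F','#'])]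
          · by_cases h4 : a = 'A'
            · subst h4
              simp [List.foldl, PySem.Chars.startswith, List.isPrefixOf, pvReplace1, pvSharp,
                PySem.List.slice, contains_pair, (by decide : ENHARMONIC_SHARP.getD ['A','b'] [] = ['G','#'])]
            · by_cases h5 : a = 'B'
              · subst h5
                simp [List.foldl, PySem.Chars.startswith, List.isPrefixOf, pvReplace1, pvSharp,
                  PySem.List.slice, contains_pair, (by decide : ENHARMONIC_SHARP.getD ['B','b'] [] = ['A','#'])]
              · simp [List.foldl, PySem.Chars.startswith, List.isPrefixOf, pvSharp,
                  PySem.List.slice, contains_pair, Ne.symm h1, Ne.symm h2, Ne.symm h3, Ne.symm h4,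
                  Ne.symm h5]
    · simp [List.foldl, PySem.Chars.startswith, List.isPrefixOf, pvSharp,
        PySem.List.slice, contains_pair, Ne.symm hb]

theorem getD_no_slash (p : List Char) (h : ENHARMONIC_SHARP.contains p = true) :
    '/' ∉ ENHARMONIC_SHARP.getD p [] := by
  rw [contains_pair] at h
  simp only [Bool.or_eq_true, beq_iff_eq] at h
  rcases h with (((h | h) | h) | h) | h <;> rw [← h] <;> decide

theorem slash_notMem_sharp (cs : List Char) (h : '/' ∉ cs) : '/' ∉ pvSharp cs := by
  by_cases hc : ENHARMONIC_SHARP.contains (PySem.List.slice cs none (some 2)) = true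
  · have he : pvSharp cs =
        ENHARMONIC_SHARP.getD (PySem.List.slice cs none (some 2)) [] ++ PySem.List.slice cs (some 2) none := by
      simp [pvSharp, hc]
    rw [he]
    intro hm
    rcases List.mem_append.1 hm with hm | hm
    · exact getD_no_slash _ hc hm
    · refine h ?_
      have hd : PySem.List.slice cs (some 2) none = List.drop 2 cs :=
        PySem.List.slice_from cs (by omega)
      exact List.mem_of_mem_drop (by rwa [hd] at hm)
  · have he : pvSharp cs = cs := by simp [pvSharp, hc]
    rw [he]; exact h

theorem sharp_two (a b : Char) (rest : List Char) :
    pvSharp (a :: b :: rest) =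
      if ENHARMONIC_SHARP.contains [a, b] then ENHARMONIC_SHARP.getD [a, b] [] ++ rest
      else a :: b :: rest := by
  simp [pvSharp, PySem.List.slice]

theorem sharp_append (a b : List Char) (h : '/' ∉ a) :
    pvSharp (a ++ '/' :: b) = pvSharp a ++ '/' :: b := by
  match a with
  | [] =>
    cases b with
    | nil => simp [pvSharp, PySem.List.slice, contains_pair]
    | cons c r => simp [pvSharp, PySem.List.slice, contains_pair]
  | [x] =>
    have hx : x ≠ '/' := by simp at h; exact fun he => h he.symm
    simp [pvSharp, PySem.List.slice, contains_pair]
  | x :: y :: r =>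
    rw [List.cons_append, List.cons_append, sharp_two, sharp_two]
    split <;> simp

-- A's bass loop over the pair state = B's prefix lookup on the bass
theorem pair_fold (base x b : List Char) :
    (ENHARMONIC_SHARP.items.foldl
      (fun st p =>
        if PySem.Chars.startswith st.2 p.1 then
          (base ++ '/' :: pvReplace1 st.2 p.1 p.2, pvReplace1 st.2 p.1 p.2)
        else st) (x, b))
      = if ENHARMONIC_SHARP.contains (PySem.List.slice b none (some 2)) then
          (base ++ '/' :: pvSharp b, pvSharp b)
        else (x, b) := by
  rw [items_lit]
  match b with
  | [] => simp [List.foldl, PySem.Chars.startswith, List.isPrefixOf, PySem.List.slice, contains_pair]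
  | [a] => simp [List.foldl, PySem.Chars.startswith, List.isPrefixOf, PySem.List.slice, contains_pair]
  | a :: c :: rest =>
    by_cases hb : c = 'b'
    · subst hb
      by_cases h1 : a = 'D'
      · subst h1
        simp [List.foldl, PySem.Chars.startswith, List.isPrefixOf, pvReplace1, pvSharp,
          PySem.List.slice, contains_pair, (by decide : ENHARMONIC_SHARP.getD ['D','b'] [] = ['C','#'])]
      · by_cases h2 : a = 'E'
        · subst h2
          simp [List.foldl, PySem.Chars.startswith, List.isPrefixOf, pvReplace1, pvSharp,
            PySem.List.slice, contains_pair, (by decide : ENHARMONIC_SHARP.getD ['E','b'] [] = ['D','#'])]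
        · by_cases h3 : a = 'G'
          · subst h3
            simp [List.foldl, PySem.Chars.startswith, List.isPrefixOf, pvReplace1, pvSharp,
              PySem.List.slice, contains_pair, (by decide : ENHARMONIC_SHARP.getD ['G','b'] [] = ['F','#'])]
          · by_cases h4 : a = 'A'
            · subst h4
              simp [List.foldl, PySem.Chars.startswith, List.isPrefixOf, pvReplace1, pvSharp,
                PySem.List.slice, contains_pair, (by decide : ENHARMONIC_SHARP.getD ['A','b'] [] = ['G','#'])]
            · by_cases h5 : a = 'B'
              · subst h5
                simp [List.foldl, PySem.Chars.startswith, List.isPrefixOf, pvReplace1, pvSharp,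
                  PySem.List.slice, contains_pair, (by decide : ENHARMONIC_SHARP.getD ['B','b'] [] = ['A','#'])]
              · simp [List.foldl, PySem.Chars.startswith, List.isPrefixOf, 
                  PySem.List.slice, contains_pair, Ne.symm h1, Ne.symm h2, Ne.symm h3, Ne.symm h4,
                  Ne.symm h5]
    · simp [List.foldl, PySem.Chars.startswith, List.isPrefixOf,
        PySem.List.slice, contains_pair, Ne.symm hb]

theorem sharp_id_of_not_contains (b : List Char)
    (h : ENHARMONIC_SHARP.contains (PySem.List.slice b none (some 2)) = false) :
    pvSharp b = b := by
  unfold pvSharp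
  simp [h]

theorem isIn_slash_iff (cs : List Char) : PySem.Chars.isIn ['/'] cs = true ↔ '/' ∈ cs := by
  rw [PySem.Chars.isIn_iff_infix]
  constructor
  · intro h; exact h.mem (by simp)
  · intro h
    obtain ⟨s, t, rfl⟩ := List.append_of_mem h
    exact ⟨s, t, by simp⟩

-- ===== VERDICT (by name: the statement is the Claim_ definition above) =====
theorem acorde_para_sustenido_spec : Claim_equal_acorde_para_sustenido := by
  intro acorde _
  unfold Spec_acorde_para_sustenido acorde_para_sustenido acorde_para_sustenido_alt
  simp only [fold_eq_sharp, splitOnMax_one]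
  cases hs : splitFirst acorde.toList with
  | none =>
    have hno : '/' ∉ acorde.toList := (splitFirst_none_iff _).1 hs
    have hno' : '/' ∉ pvSharp acorde.toList := slash_notMem_sharp _ hno
    have hin : PySem.Chars.isIn ['/'] (pvSharp acorde.toList) = false := by
      rw [Bool.eq_false_iff]; intro hc; exact hno' ((isIn_slash_iff _).1 hc)
    rw [(splitFirst_none_iff _).2 hno']
    simp [hin, PySem.Chars.join, List.intercalate]
  | some p =>
    obtain ⟨a, b⟩ := p
    obtain ⟨hcs, hna⟩ := splitFirst_some _ _ _ hs
    rw [hcs, sharp_append a b hna]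
    have hna' : '/' ∉ pvSharp a := slash_notMem_sharp _ hna
    have hin : PySem.Chars.isIn ['/'] (pvSharp a ++ '/' :: b) = true :=
      (isIn_slash_iff _).2 (by simp)
    rw [hin, if_pos rfl, splitFirst_append _ _ hna']
    cases hc : ENHARMONIC_SHARP.contains (PySem.List.slice b none (some 2)) with
    | true => simp [pair_fold, hc, PySem.Chars.join, List.intercalate]
    | false =>
      simp [pair_fold, hc, PySem.Chars.join, List.intercalate, sharp_id_of_not_contains b hc]
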